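-- pv_equiv track=rewrite | github.com/modulabs/blockchain-lab | season3/ewmkkpe/carbi/carbi/cmp.py | to_comparable_repr
-- ===== SOURCE A (Python) =====
-- EXCHANGE_ORDER = ['coinone', 'korbit', 'upbit', 'bitfinex', 'cex', 'binance', 'poloniex']
--
-- EQUITY_ORDER = ['btc', 'eth', 'bch', 'xrp', 'bnb', 'usd', 'usdt', 'krw']
--
-- def to_comparable_repr(value):
--   comparable_repr = value
--   for exchange in EXCHANGE_ORDER:
--     idx = EXCHANGE_ORDER.index(exchange)
--     comparable_repr = comparable_repr.replace(exchange, '!{0:012d}'.format(idx))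
--   for equity in EQUITY_ORDER:
--     idx = EQUITY_ORDER.index(equity)
--     comparable_repr = comparable_repr.replace(equity, '!{0:012d}'.format(idx))
--   return comparable_repr
-- ===== SOURCE B (Python) =====
-- EXCHANGE_ORDER = ['coinone', 'korbit', 'upbit', 'bitfinex', 'cex', 'binance', 'poloniex']
--
-- EQUITY_ORDER = ['btc', 'eth', 'bch', 'xrp', 'bnb', 'usd', 'usdt', 'krw']
--
-- TABLE = [(name, '!{0:012d}'.format(i))
--          for order in (EXCHANGE_ORDER, EQUITY_ORDER)
--          for i, name in enumerate(order)]
--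
--
-- def to_comparable_repr(value):
--   # Keep the text as a list of pieces: raw (not yet rewritten) text and
--   # already-emitted codes.  Each name splits only the raw pieces, so emitted
--   # codes are never rescanned by later names.
--   pieces = [(False, value)]
--   for name, code in TABLE:
--     new_pieces = []
--     for is_code, text in pieces:
--       if is_code:
--         new_pieces.append((True, text))
--       else:
--         for k, part in enumerate(text.split(name)):
--           if k:
--             new_pieces.append((True, code))
--           new_pieces.append((False, part))
--     pieces = new_pieces
--   return ''.join(text for _, text in pieces)
-- ===== Notes on version B (the rewrite author's own statement) =====
-- stated objective: alternative
-- what changed: Instead of rebuilding the whole string with 15 chained str.replace passes (each rescanning previously inserted codes), B keeps the text as a list of raw/code pieces built from one table of (name, code) pairs, splits only the raw pieces on each name and never rescans emitted codes, joining once at the end.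
import Mathlib
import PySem

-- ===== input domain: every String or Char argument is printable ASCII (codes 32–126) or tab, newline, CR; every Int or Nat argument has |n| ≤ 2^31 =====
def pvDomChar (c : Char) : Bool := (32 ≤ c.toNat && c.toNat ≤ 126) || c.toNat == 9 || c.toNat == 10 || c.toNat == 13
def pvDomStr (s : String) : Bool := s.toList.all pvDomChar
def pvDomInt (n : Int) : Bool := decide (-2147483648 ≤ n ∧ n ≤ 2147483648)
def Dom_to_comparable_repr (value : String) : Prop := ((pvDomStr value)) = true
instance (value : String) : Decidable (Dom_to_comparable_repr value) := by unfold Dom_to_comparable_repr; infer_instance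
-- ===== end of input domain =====

set_option maxRecDepth 8000


-- B keeps the text as a list of raw/code pieces and splits only raw pieces on each name,
-- never rescanning emitted codes (alternative algorithm, same asymptotic cost).

-- ===== PORT A =====
def pvFmt (idx : Int) : String := "!" ++ PySem.Str.zfill (PySem.Int.toStr idx) 12

def EXCHANGE_ORDER : List String := ["coinone", "korbit", "upbit", "bitfinex", "cex", "binance", "poloniex"]

def EQUITY_ORDER : List String := ["btc", "eth", "bch", "xrp", "bnb", "usd", "usdt", "krw"]

def to_comparable_repr (value : String) : String :=
  let afterExchanges := EXCHANGE_ORDER.foldl (fun comparable_repr exchange =>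
    -- idx = EXCHANGE_ORDER.index(exchange): the element is taken from the list, so `.getD 0` is unreachable
    let idx : Int := ((PySem.List.index? EXCHANGE_ORDER exchange).getD 0 : Nat)
    PySem.Str.replace comparable_repr exchange (pvFmt idx)) value
  EQUITY_ORDER.foldl (fun comparable_repr equity =>
    let idx : Int := ((PySem.List.index? EQUITY_ORDER equity).getD 0 : Nat)
    PySem.Str.replace comparable_repr equity (pvFmt idx)) afterExchanges

-- ===== PORT B =====
def pvTable : List (String × String) :=
  [EXCHANGE_ORDER, EQUITY_ORDER].flatMap (fun order =>
    (PySem.List.enumerate order).map (fun p => (p.2, pvFmt p.1)))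

def pvSplitRaw (name code text : String) : List (Bool × String) :=
  -- "for k, part in enumerate(text.split(name)): if k: emit (True, code); emit (False, part)"
  match (PySem.Str.split? text name).getD [] with  -- names are nonempty, so split? is always `some`
  | [] => []                                       -- unreachable: split returns at least one part
  | part0 :: parts => (false, part0) :: parts.flatMap (fun part => [(true, code), (false, part)])

def to_comparable_repr_alt (value : String) : String :=
  let pieces := pvTable.foldl (fun pieces nc =>
      pieces.foldl (fun newPieces p =>
        if p.1 then newPieces ++ [(true, p.2)]
        else newPieces ++ pvSplitRaw nc.1 nc.2 p.2) []) [(false, value)]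
  PySem.Str.join "" (pieces.map Prod.snd)

-- ===== PRECONDITION & SPEC =====
def Spec_to_comparable_repr (value : String) (out : String) : Prop := out = to_comparable_repr_alt value
instance (value : String) (out : String) : Decidable (Spec_to_comparable_repr value out) := by unfold Spec_to_comparable_repr; infer_instance

-- ===== CLAIM (what is proved, stated in full; the proofs are below) =====
def Claim_equal_to_comparable_repr : Prop := ∀ (value : String), Dom_to_comparable_repr value → Spec_to_comparable_repr value (to_comparable_repr value)

-- ===== LEMMAS AND PROOFS =====

-- a lowercase ASCII letter (every character of every name is one; no character of any code is one)
def pvLetter (c : Char) : Bool := 'a' ≤ c && c ≤ 'z'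

def pvNameOK (n : List Char) : Prop := n ≠ [] ∧ n.all pvLetter = true

def pvCodeOK (c : List Char) : Prop := c ≠ [] ∧ c.all (fun ch => !pvLetter ch) = true

-- ---- unfolding equations for PySem.Chars.replace ----

theorem pvGoZero (old new l acc : List Char) :
    PySem.Chars.replace.go old new 0 l acc = acc.reverse ++ l := by
  simp [PySem.Chars.replace.go]

theorem pvGoNil (old new acc : List Char) (f : Nat) :
    PySem.Chars.replace.go old new (f + 1) [] acc = acc.reverse := by
  simp [PySem.Chars.replace.go]

theorem pvGoCons (old new acc t : List Char) (c : Char) (f : Nat) :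
    PySem.Chars.replace.go old new (f + 1) (c :: t) acc
      = if old.isPrefixOf (c :: t)
          then PySem.Chars.replace.go old new f (List.drop old.length (c :: t)) (new.reverse ++ acc)
          else PySem.Chars.replace.go old new f t (c :: acc) := by
  rw [PySem.Chars.replace.go]

theorem pvReplEqGo (s old new : List Char) (hold : old ≠ []) :
    PySem.Chars.replace s old new = PySem.Chars.replace.go old new s.length s [] := by
  rw [PySem.Chars.replace]
  simp [List.isEmpty_iff, hold]

theorem pvReplGoNorm (old new : List Char) (hold : old ≠ []) :
    ∀ fuel l acc, l.length ≤ fuel →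
      PySem.Chars.replace.go old new fuel l acc
        = acc.reverse ++ PySem.Chars.replace.go old new l.length l [] := by
  intro fuel
  induction fuel using Nat.strong_induction_on with
  | _ fuel ih =>
    intro l acc hle
    cases fuel with
    | zero =>
      have hl : l = [] := List.eq_nil_of_length_eq_zero (Nat.le_zero.mp hle)
      subst hl; simp [pvGoZero]
    | succ f =>
      cases l with
      | nil => simp [pvGoNil, pvGoZero]
      | cons c t =>
        have hlt : List.length t ≤ f := by simpa using hle
        rw [pvGoCons]
        rw [show (c :: t).length = t.length + 1 from rfl, pvGoCons]
        by_cases hp : old.isPrefixOf (c :: t)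
        · simp only [hp, if_true]
          have hdl : (List.drop old.length (c :: t)).length ≤ t.length := by
            simp only [List.length_drop, List.length_cons]
            have : 1 ≤ old.length := Nat.one_le_iff_ne_zero.mpr (by
              simpa [List.length_eq_zero_iff] using hold)
            omega
          rw [ih f (Nat.lt_succ_self f) _ _ (le_trans hdl hlt),
            ih t.length (Nat.lt_succ_of_le hlt) _ _ hdl]
          simp
        · simp only [hp]
          rw [ih f (Nat.lt_succ_self f) _ _ hlt,
            ih t.length (Nat.lt_succ_of_le hlt) t [c] (le_refl _)]
          simp

theorem pvReplNil (old new : List Char) (hold : old ≠ []) :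
    PySem.Chars.replace [] old new = [] := by
  rw [pvReplEqGo _ _ _ hold]
  simp [pvGoZero]

theorem pvReplCons (old new : List Char) (c : Char) (t : List Char)
    (h : ¬ old <+: (c :: t)) :
    PySem.Chars.replace (c :: t) old new = c :: PySem.Chars.replace t old new := by
  have hold : old ≠ [] := by
    rintro rfl; exact h (List.nil_prefix)
  rw [pvReplEqGo _ _ _ hold, pvReplEqGo _ _ _ hold]
  rw [show (c :: t).length = t.length + 1 from rfl, pvGoCons]
  have hp : old.isPrefixOf (c :: t) = false := by
    rw [Bool.eq_false_iff]
    intro hb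
    exact h (List.isPrefixOf_iff_prefix.mp hb)
  rw [hp]
  simp only [Bool.false_eq_true, if_false]
  rw [pvReplGoNorm old new hold t.length t [c] (le_refl _)]
  simp

theorem pvReplPref (old new x : List Char) (hold : old ≠ []) :
    PySem.Chars.replace (old ++ x) old new = new ++ PySem.Chars.replace x old new := by
  obtain ⟨o, old', rfl⟩ : ∃ o old', old = o :: old' := by
    cases old with
    | nil => exact absurd rfl hold
    | cons o old' => exact ⟨o, old', rfl⟩
  rw [pvReplEqGo _ _ _ hold, pvReplEqGo _ _ _ hold]
  rw [List.cons_append]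
  rw [show (o :: (old' ++ x)).length = (old' ++ x).length + 1 from by simp, pvGoCons]
  have hp : (o :: old').isPrefixOf (o :: (old' ++ x)) = true :=
    List.isPrefixOf_iff_prefix.mpr (by
      rw [← List.cons_append]; exact List.prefix_append _ _)
  rw [hp]
  simp only [if_true]
  have hdrop : List.drop (o :: old').length (o :: (old' ++ x)) = x := by
    simp
  rw [hdrop]
  have hxlen : x.length ≤ (old' ++ x).length := by simp
  rw [pvReplGoNorm _ _ hold _ _ _ hxlen]
  simp

-- ---- unfolding equations for PySem.Chars.splitOn ----

theorem pvSGoZero (sep l cur : List Char) (acc : List (List Char)) :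
    PySem.Chars.splitOn.go sep 0 l cur acc = ((cur.reverse ++ l) :: acc).reverse := by
  simp [PySem.Chars.splitOn.go]

theorem pvSGoNil (sep cur : List Char) (acc : List (List Char)) (f : Nat) :
    PySem.Chars.splitOn.go sep (f + 1) [] cur acc = (cur.reverse :: acc).reverse := by
  simp [PySem.Chars.splitOn.go]

theorem pvSGoCons (sep t cur : List Char) (acc : List (List Char)) (c : Char) (f : Nat) :
    PySem.Chars.splitOn.go sep (f + 1) (c :: t) cur acc
      = if sep.isPrefixOf (c :: t)
          then PySem.Chars.splitOn.go sep f (List.drop sep.length (c :: t)) [] (cur.reverse :: acc)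
          else PySem.Chars.splitOn.go sep f t (c :: cur) acc := by
  rw [PySem.Chars.splitOn.go]

theorem pvSepLenPos (sep : List Char) (hsep : sep ≠ []) : 1 ≤ sep.length :=
  Nat.one_le_iff_ne_zero.mpr (by simpa [List.length_eq_zero_iff] using hsep)

theorem pvSplitGoNorm (sep : List Char) (hsep : sep ≠ []) :
    ∀ fuel l cur acc, l.length ≤ fuel →
      ∃ p0 ps, PySem.Chars.splitOn.go sep l.length l [] [] = p0 :: ps ∧
        PySem.Chars.splitOn.go sep fuel l cur acc
          = acc.reverse ++ (cur.reverse ++ p0) :: ps := by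
  intro fuel
  induction fuel using Nat.strong_induction_on with
  | _ fuel ih =>
    intro l cur acc hle
    cases fuel with
    | zero =>
      have hl : l = [] := List.eq_nil_of_length_eq_zero (Nat.le_zero.mp hle)
      subst hl
      exact ⟨[], [], by simp [pvSGoZero], by simp [pvSGoZero]⟩
    | succ f =>
      cases l with
      | nil => exact ⟨[], [], by simp [pvSGoZero], by simp [pvSGoNil]⟩
      | cons c t =>
        have hlt : List.length t ≤ f := by simpa using hle
        rw [pvSGoCons]
        rw [show (c :: t).length = t.length + 1 from rfl, pvSGoCons]
        by_cases hp : sep.isPrefixOf (c :: t)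
        · simp only [hp, if_true, List.reverse_nil]
          have hdl : (List.drop sep.length (c :: t)).length ≤ t.length := by
            simp only [List.length_drop, List.length_cons]
            have := pvSepLenPos sep hsep
            omega
          obtain ⟨q0, qs, hq, hinner⟩ :=
            ih t.length (Nat.lt_succ_of_le hlt) (List.drop sep.length (c :: t)) [] [[]] hdl
          obtain ⟨q0', qs', hq', houter⟩ :=
            ih f (Nat.lt_succ_self f) (List.drop sep.length (c :: t)) []
              (cur.reverse :: acc) (le_trans hdl hlt)
          injection (hq.symm.trans hq') with h1 h2
          subst h1; subst h2
          refine ⟨[], q0 :: qs, ?_, ?_⟩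
          · rw [hinner]; simp
          · rw [houter]; simp
        · simp only [hp]
          obtain ⟨q0, qs, hq, hinner⟩ :=
            ih t.length (Nat.lt_succ_of_le hlt) t [c] [] (le_refl _)
          obtain ⟨q0', qs', hq', houter⟩ :=
            ih f (Nat.lt_succ_self f) t (c :: cur) acc hlt
          injection (hq.symm.trans hq') with h1 h2
          subst h1; subst h2
          refine ⟨c :: q0, qs, ?_, ?_⟩
          · rw [hinner]; simp
          · rw [houter]; simp

theorem pvSplitOnEq (s sep : List Char) (hsep : sep ≠ []) :
    PySem.Chars.splitOn s sep = PySem.Chars.splitOn.go sep s.length s [] [] := by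
  rw [PySem.Chars.splitOn]
  obtain ⟨p0, ps, hq, houter⟩ :=
    pvSplitGoNorm sep hsep (s.length + 1) s [] [] (Nat.le_succ _)
  rw [hq, houter]; simp

theorem pvSplitNil (sep : List Char) (hsep : sep ≠ []) :
    PySem.Chars.splitOn [] sep = [[]] := by
  rw [pvSplitOnEq _ _ hsep]
  simp [pvSGoZero]

theorem pvSplitNeNil (s sep : List Char) (hsep : sep ≠ []) :
    PySem.Chars.splitOn s sep ≠ [] := by
  rw [pvSplitOnEq _ _ hsep]
  obtain ⟨p0, ps, hq, _⟩ := pvSplitGoNorm sep hsep s.length s [] [] (le_refl _)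
  rw [hq]; simp

theorem pvSplitCons (sep : List Char) (hsep : sep ≠ []) (c : Char) (t p0 : List Char)
    (ps : List (List Char)) (h : ¬ sep <+: (c :: t))
    (ht : PySem.Chars.splitOn t sep = p0 :: ps) :
    PySem.Chars.splitOn (c :: t) sep = (c :: p0) :: ps := by
  rw [pvSplitOnEq _ _ hsep]
  rw [show (c :: t).length = t.length + 1 from rfl, pvSGoCons]
  have hp : sep.isPrefixOf (c :: t) = false := by
    rw [Bool.eq_false_iff]
    intro hb
    exact h (List.isPrefixOf_iff_prefix.mp hb)
  rw [hp]
  simp only [Bool.false_eq_true, if_false]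
  obtain ⟨q0, qs, hq, houter⟩ := pvSplitGoNorm sep hsep t.length t [c] [] (le_refl _)
  rw [pvSplitOnEq _ _ hsep, hq] at ht
  injection ht with h1 h2
  subst h1; subst h2
  rw [houter]; simp

theorem pvSplitPref (sep x : List Char) (hsep : sep ≠ []) :
    PySem.Chars.splitOn (sep ++ x) sep = [] :: PySem.Chars.splitOn x sep := by
  obtain ⟨s0, sep', rfl⟩ : ∃ s0 sep', sep = s0 :: sep' := by
    cases sep with
    | nil => exact absurd rfl hsep
    | cons s0 sep' => exact ⟨s0, sep', rfl⟩
  rw [pvSplitOnEq _ _ hsep]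
  rw [List.cons_append]
  rw [show (s0 :: (sep' ++ x)).length = (sep' ++ x).length + 1 from by simp, pvSGoCons]
  have hp : (s0 :: sep').isPrefixOf (s0 :: (sep' ++ x)) = true :=
    List.isPrefixOf_iff_prefix.mpr (by
      rw [← List.cons_append]; exact List.prefix_append _ _)
  rw [hp]
  simp only [if_true]
  have hdrop : List.drop (s0 :: sep').length (s0 :: (sep' ++ x)) = x := by simp
  rw [hdrop]
  have hxlen : x.length ≤ (sep' ++ x).length := by simp
  obtain ⟨q0, qs, hq, houter⟩ :=
    pvSplitGoNorm (s0 :: sep') hsep (sep' ++ x).length x [] [[]] hxlen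
  simp only [List.reverse_nil]
  rw [houter, pvSplitOnEq _ _ hsep, hq]
  simp

-- ---- replace = join ∘ splitOn ----

theorem pvReplEqJoin (old new : List Char) (hold : old ≠ []) :
    ∀ s, PySem.Chars.replace s old new
      = PySem.Chars.join new (PySem.Chars.splitOn s old) := by
  suffices main : ∀ n (s : List Char), s.length ≤ n →
      PySem.Chars.replace s old new
        = PySem.Chars.join new (PySem.Chars.splitOn s old) from
    fun s => main s.length s (le_refl _)
  intro n
  induction n using Nat.strong_induction_on with
  | _ n ih =>
    intro s hle
    by_cases hp : old <+: s
    · obtain ⟨x, rfl⟩ := hp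
      have hxlt : x.length < n := by
        have h1 := pvSepLenPos old hold
        simp only [List.length_append] at hle
        omega
      rw [pvReplPref _ _ _ hold, pvSplitPref _ _ hold]
      rw [ih x.length hxlt x (le_refl _)]
      rcases hsplit : PySem.Chars.splitOn x old with _ | ⟨q0, qs⟩
      · exact absurd hsplit (pvSplitNeNil x old hold)
      · rw [PySem.Chars.join_cons_cons]
        simp
    · cases s with
      | nil =>
        rw [pvReplNil _ _ hold, pvSplitNil _ hold, PySem.Chars.join_singleton]
      | cons c t =>
        have htlt : t.length < n := by
          simp only [List.length_cons] at hle
          omega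
        rcases hsplit : PySem.Chars.splitOn t old with _ | ⟨q0, qs⟩
        · exact absurd hsplit (pvSplitNeNil t old hold)
        rw [pvReplCons _ _ _ _ hp, pvSplitCons old hold c t q0 qs hp hsplit]
        rw [ih t.length htlt t (le_refl _), hsplit]
        cases qs with
        | nil => rw [PySem.Chars.join_singleton, PySem.Chars.join_singleton]
        | cons q1 qs' =>
          rw [PySem.Chars.join_cons_cons, PySem.Chars.join_cons_cons]
          simp

-- ---- append decompositions of replace ----

theorem pvReplFront (old new : List Char) :
    ∀ (a x : List Char), (∀ i < a.length, ¬ old <+: (a.drop i ++ x)) →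
      PySem.Chars.replace (a ++ x) old new = a ++ PySem.Chars.replace x old new := by
  intro a
  induction a with
  | nil => intro x _; simp
  | cons c a' iha =>
    intro x h
    have h0 : ¬ old <+: (c :: (a' ++ x)) := by
      simpa using h 0 (by simp)
    rw [List.cons_append, pvReplCons _ _ _ _ h0]
    rw [iha x (fun i hi => by
      simpa using h (i + 1) (by simpa using Nat.succ_lt_succ hi))]
    simp

theorem pvNonletterFront (old : List Char) (hn : pvNameOK old) (a x : List Char)
    (ha : a.all (fun c => !pvLetter c) = true) :
    ∀ i < a.length, ¬ old <+: (a.drop i ++ x) := by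
  intro i hi hpre
  obtain ⟨o, old', rfl⟩ : ∃ o old', old = o :: old' := by
    cases old with
    | nil => exact absurd rfl hn.1
    | cons o old' => exact ⟨o, old', rfl⟩
  rw [List.drop_eq_getElem_cons hi, List.cons_append] at hpre
  obtain ⟨t, ht⟩ := hpre
  have hoe : o = a[i] := by
    have := congrArg (fun l => l.head?) ht
    simpa using this
  have holet : pvLetter o = true :=
    List.all_eq_true.mp hn.2 o (by simp)
  have hanolet : (!pvLetter a[i]) = true :=
    List.all_eq_true.mp ha a[i] (List.getElem_mem hi)
  rw [hoe] at holet
  rw [holet] at hanolet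
  simp at hanolet

theorem pvReplBoundary (old new : List Char) (hn : pvNameOK old) :
    ∀ (r x : List Char), (x = [] ∨ ∃ h t, x = h :: t ∧ pvLetter h = false) →
      PySem.Chars.replace (r ++ x) old new
        = PySem.Chars.replace r old new ++ PySem.Chars.replace x old new := by
  suffices main : ∀ n (r x : List Char), r.length ≤ n →
      (x = [] ∨ ∃ h t, x = h :: t ∧ pvLetter h = false) →
      PySem.Chars.replace (r ++ x) old new
        = PySem.Chars.replace r old new ++ PySem.Chars.replace x old new from
    fun r x hx => main r.length r x (le_refl _) hx
  intro n
  induction n using Nat.strong_induction_on with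
  | _ n ih =>
    intro r x hle hx
    by_cases hpr : old <+: r
    · obtain ⟨r', rfl⟩ := hpr
      have hlt : r'.length < n := by
        have := pvSepLenPos old hn.1
        simp only [List.length_append] at hle
        omega
      rw [List.append_assoc, pvReplPref _ _ _ hn.1, pvReplPref _ _ _ hn.1]
      rw [ih r'.length hlt r' x (le_refl _) hx]
      simp
    · cases r with
      | nil => simp [pvReplNil _ _ hn.1]
      | cons c r' =>
        have hnp : ¬ old <+: ((c :: r') ++ x) := by
          intro hcon
          rcases Nat.lt_or_ge (c :: r').length old.length with hl | hl
          case _ =>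
            rcases hx with rfl | ⟨h0, t0, rfl, hlt0⟩
            · have h1 := hcon.length_le
              simp only [List.append_nil] at h1
              omega
            · obtain ⟨t, ht⟩ := hcon
              have hilt : (c :: r').length < ((c :: r') ++ (h0 :: t0)).length := by
                simp
              have hid : ((c :: r') ++ (h0 :: t0))[(c :: r').length]'hilt = h0 := by
                rw [List.getElem_append_right (le_refl _)]
                simp
              have hilt2 : (c :: r').length < (old ++ t).length := by
                rw [ht]; exact hilt
              have hid2 : (old ++ t)[(c :: r').length]'hilt2 = old[(c :: r').length]'hl := by
                rw [List.getElem_append_left hl]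
              have hco : h0 = old[(c :: r').length]'hl := by
                rw [← hid, ← hid2]
                congr 1
                exact ht.symm
              have holet : pvLetter (old[(c :: r').length]'hl) = true :=
                List.all_eq_true.mp hn.2 _ (List.getElem_mem hl)
              rw [← hco] at holet
              rw [holet] at hlt0
              exact absurd hlt0 (by simp)
          case _ =>
            refine hpr ?_
            obtain ⟨t, ht⟩ := hcon
            have h1 : ((c :: r') ++ x).take old.length = old := by
              rw [← ht]
              simp
            have heq : old = (c :: r').take old.length := by
              conv_lhs => rw [← h1]
              exact List.take_append_of_le_length hl
            have h2 := List.take_prefix old.length (c :: r')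
            rwa [← heq] at h2
        have htlt : r'.length < n := by
          simp only [List.length_cons] at hle
          omega
        rw [List.cons_append] at hnp ⊢
        rw [pvReplCons _ _ _ _ hnp, pvReplCons _ _ _ _ hpr]
        rw [ih r'.length htlt r' x (le_refl _) hx]
        simp

-- ---- the piece framework (Chars level) ----

def pvRender (ps : List (Bool × List Char)) : List Char := (ps.map Prod.snd).flatten

def pvSep (ps : List (Bool × List Char)) : Prop :=
  List.IsChain (fun p q => p.1 = false → q.1 = true) ps

def pvCodesOK (ps : List (Bool × List Char)) : Prop :=
  ∀ p ∈ ps, p.1 = true → p.2 ≠ [] ∧ ∀ ch ∈ p.2, pvLetter ch = false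

def pvSplitC (name code r : List Char) : List (Bool × List Char) :=
  match PySem.Chars.splitOn r name with
  | [] => []
  | p0 :: ps => (false, p0) :: ps.flatMap (fun p => [(true, code), (false, p)])

def pvStepC (name code : List Char) (ps : List (Bool × List Char)) : List (Bool × List Char) :=
  ps.foldl (fun acc p => if p.1 then acc ++ [(true, p.2)] else acc ++ pvSplitC name code p.2) []

theorem pvFoldlAppend {α β : Type} (f : α → List β) :
    ∀ (ps : List α) (acc : List β),
      ps.foldl (fun a p => a ++ f p) acc = acc ++ ps.flatMap f := by
  intro ps
  induction ps with
  | nil => intro acc; simp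
  | cons p rest ih => intro acc; simp [ih]

theorem pvStepCFlatMap (name code : List Char) (ps : List (Bool × List Char)) :
    pvStepC name code ps
      = ps.flatMap (fun p => if p.1 then [(true, p.2)] else pvSplitC name code p.2) := by
  unfold pvStepC
  have hfun : (fun (acc : List (Bool × List Char)) (p : Bool × List Char) =>
      if p.1 then acc ++ [(true, p.2)] else acc ++ pvSplitC name code p.2)
      = fun acc p => acc ++ (if p.1 then [(true, p.2)] else pvSplitC name code p.2) := by
    funext acc p
    by_cases hb : p.1 <;> simp [hb]
  rw [hfun, pvFoldlAppend]
  simp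

theorem pvRenderAppend (a b : List (Bool × List Char)) :
    pvRender (a ++ b) = pvRender a ++ pvRender b := by
  simp [pvRender]

theorem pvRenderParts (code : List Char) :
    ∀ (ps : List (List Char)) (p0 : List Char),
      pvRender ((false, p0) :: ps.flatMap (fun p => [(true, code), (false, p)]))
        = PySem.Chars.join code (p0 :: ps) := by
  intro ps
  induction ps with
  | nil => intro p0; simp [pvRender, PySem.Chars.join_singleton]
  | cons q qs ih =>
    intro p0
    rw [PySem.Chars.join_cons_cons, ← ih q]
    simp [pvRender]

theorem pvRenderSplitC (name code r : List Char) (hn : pvNameOK name) :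
    pvRender (pvSplitC name code r) = PySem.Chars.join code (PySem.Chars.splitOn r name) := by
  rcases hsplit : PySem.Chars.splitOn r name with _ | ⟨p0, ps⟩
  · exact absurd hsplit (pvSplitNeNil r name hn.1)
  · unfold pvSplitC
    rw [hsplit, pvRenderParts]

theorem pvStepRender (name code : List Char) (hn : pvNameOK name) (_hc : pvCodeOK code) :
    ∀ ps, pvCodesOK ps → pvSep ps →
      PySem.Chars.replace (pvRender ps) name code = pvRender (pvStepC name code ps) := by
  intro ps
  induction ps with
  | nil =>
    intro _ _
    simp [pvRender, pvStepC, pvReplNil _ _ hn.1]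
  | cons p rest ihr =>
    intro hcodes hsep
    have hcr : pvCodesOK rest := fun q hq => hcodes q (List.mem_cons_of_mem _ hq)
    have hsr : pvSep rest := hsep.tail
    rw [pvStepCFlatMap, List.flatMap_cons, pvRenderAppend, ← pvStepCFlatMap]
    obtain ⟨b, s⟩ := p
    cases b with
    | true =>
      have hs := hcodes (true, s) List.mem_cons_self rfl
      have hrender : pvRender ((true, s) :: rest) = s ++ pvRender rest := by
        simp [pvRender]
      rw [hrender, pvReplFront name code s (pvRender rest)
        (pvNonletterFront name hn s (pvRender rest)
          (List.all_eq_true.mpr (fun c hc' => by simp [hs.2 c hc'])))]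
      rw [ihr hcr hsr]
      simp [pvRender]
    | false =>
      have hx : pvRender rest = [] ∨ ∃ h t, pvRender rest = h :: t ∧ pvLetter h = false := by
        cases rest with
        | nil => left; rfl
        | cons q rest' =>
          have hq1 : q.1 = true := hsep.rel_head rfl
          have hq := hcodes q (List.mem_cons_of_mem _ List.mem_cons_self) hq1
          obtain ⟨h0, t0, hq2⟩ : ∃ h0 t0, q.2 = h0 :: t0 := by
            rcases hqq : q.2 with _ | ⟨h0, t0⟩
            · exact absurd hqq hq.1
            · exact ⟨h0, t0, rfl⟩
          right
          refine ⟨h0, t0 ++ pvRender rest', ?_, ?_⟩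
          · simp [pvRender, hq2]
          · exact hq.2 h0 (by simp [hq2])
      have hrender : pvRender ((false, s) :: rest) = s ++ pvRender rest := by
        simp [pvRender]
      rw [hrender, pvReplBoundary name code hn s (pvRender rest) hx]
      rw [pvReplEqJoin name code hn.1 s, ihr hcr hsr]
      have : pvRender (pvSplitC name code s)
          = PySem.Chars.join code (PySem.Chars.splitOn s name) := pvRenderSplitC name code s hn
      rw [← this]
      simp

theorem pvSplitCMem (name code r : List Char) (q : Bool × List Char)
    (hq : q ∈ pvSplitC name code r) (hq1 : q.1 = true) : q = (true, code) := by
  unfold pvSplitC at hq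
  rcases hsplit : PySem.Chars.splitOn r name with _ | ⟨p0, ps'⟩ <;> rw [hsplit] at hq
  · simp at hq
  · rcases List.mem_cons.mp hq with rfl | hq'
    · simp at hq1
    · rw [List.mem_flatMap] at hq'
      obtain ⟨part, _, hq2⟩ := hq'
      simp only [List.mem_cons] at hq2
      rcases hq2 with rfl | rfl | h
      · rfl
      · simp at hq1
      · simp at h

theorem pvStepCodesOK (name code : List Char) (hc : pvCodeOK code)
    (ps : List (Bool × List Char)) (h : pvCodesOK ps) : pvCodesOK (pvStepC name code ps) := by
  intro q hq hq1
  rw [pvStepCFlatMap] at hq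
  rw [List.mem_flatMap] at hq
  obtain ⟨p, hp, hqin⟩ := hq
  by_cases hb : p.1
  · simp only [hb, if_true, List.mem_singleton] at hqin
    subst hqin
    exact h p hp hb
  · simp only [hb] at hqin
    have := pvSplitCMem name code p.2 q hqin hq1
    subst this
    exact ⟨hc.1, fun ch hch => by simpa using List.all_eq_true.mp hc.2 ch hch⟩

theorem pvSplitCChain (name code : List Char) (r : List Char) :
    List.IsChain (fun p q : Bool × List Char => p.1 = false → q.1 = true) (pvSplitC name code r) := by
  unfold pvSplitC
  rcases PySem.Chars.splitOn r name with _ | ⟨p0, ps⟩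
  · simp
  · induction ps generalizing p0 with
    | nil => simp
    | cons q qs ih =>
      simp only [List.flatMap_cons]
      refine List.IsChain.cons ?_ ?_
      · exact List.IsChain.cons (ih q) (by simp)
      · simp

theorem pvStepSep (name code : List Char) (_hn : pvNameOK name)
    (ps : List (Bool × List Char)) (h : pvSep ps) :
    pvSep (pvStepC name code ps) := by
  rw [pvStepCFlatMap]
  unfold pvSep
  induction ps with
  | nil => simp
  | cons p rest ih =>
    rw [List.flatMap_cons, List.isChain_append]
    refine ⟨?_, ih h.tail, ?_⟩
    · by_cases hb : p.1
      · simp [hb]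
      · simp only [hb]
        exact pvSplitCChain name code p.2
    · intro x hx y hy hx1
      cases rest with
      | nil => simp at hy
      | cons q rest' =>
        rw [List.flatMap_cons] at hy
        have hq1 : q.1 = true := by
          by_cases hb : p.1
          · exfalso
            simp only [hb, if_true] at hx
            simp at hx
            subst hx
            simp at hx1
          · exact h.rel_head (by simpa using hb)
        rw [show (if q.1 then [(true, q.2)] else pvSplitC name code q.2)
          = [(true, q.2)] from by simp [hq1]] at hy
        simp only [List.cons_append, List.nil_append, List.head?_cons,
          Option.mem_def, Option.some.injEq] at hy
        rw [← hy]

theorem pvChainEq (tab : List (List Char × List Char))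
    (htab : ∀ p ∈ tab, pvNameOK p.1 ∧ pvCodeOK p.2) :
    ∀ ps, pvCodesOK ps → pvSep ps →
      tab.foldl (fun s p => PySem.Chars.replace s p.1 p.2) (pvRender ps)
        = pvRender (tab.foldl (fun ps p => pvStepC p.1 p.2 ps) ps) := by
  induction tab with
  | nil => intro ps _ _; simp
  | cons nc tab' ih =>
    intro ps hcodes hsep
    obtain ⟨hn, hc⟩ := htab nc List.mem_cons_self
    rw [List.foldl_cons, List.foldl_cons]
    rw [pvStepRender nc.1 nc.2 hn hc ps hcodes hsep]
    exact ih (fun p hp => htab p (List.mem_cons_of_mem _ hp))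
      (pvStepC nc.1 nc.2 ps)
      (pvStepCodesOK nc.1 nc.2 hc ps hcodes)
      (pvStepSep nc.1 nc.2 hn ps hsep)

-- ---- bridging the two String-level ports to the Chars level ----

def pvTABC : List (List Char × List Char) := pvTable.map (fun p => (p.1.toList, p.2.toList))

theorem pvTableLit : pvTable =
    [("coinone", "!000000000000"), ("korbit", "!000000000001"), ("upbit", "!000000000002"),
     ("bitfinex", "!000000000003"), ("cex", "!000000000004"), ("binance", "!000000000005"),
     ("poloniex", "!000000000006"), ("btc", "!000000000000"), ("eth", "!000000000001"),
     ("bch", "!000000000002"), ("xrp", "!000000000003"), ("bnb", "!000000000004"),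
     ("usd", "!000000000005"), ("usdt", "!000000000006"), ("krw", "!000000000007")] := by
  decide

theorem pvAFoldl (v : String) : to_comparable_repr v
    = pvTable.foldl (fun acc p => PySem.Str.replace acc p.1 p.2) v := by
  have e1 : (((PySem.List.index? ((["coinone", "korbit", "upbit", "bitfinex", "cex", "binance", "poloniex"] : List String)) "coinone").getD 0 : Nat) : Int) = 0 := by decide
  have e2 : (((PySem.List.index? ((["coinone", "korbit", "upbit", "bitfinex", "cex", "binance", "poloniex"] : List String)) "korbit").getD 0 : Nat) : Int) = 1 := by decide
  have e3 : (((PySem.List.index? ((["coinone", "korbit", "upbit", "bitfinex", "cex", "binance", "poloniex"] : List String)) "upbit").getD 0 : Nat) : Int) = 2 := by decide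
  have e4 : (((PySem.List.index? ((["coinone", "korbit", "upbit", "bitfinex", "cex", "binance", "poloniex"] : List String)) "bitfinex").getD 0 : Nat) : Int) = 3 := by decide
  have e5 : (((PySem.List.index? ((["coinone", "korbit", "upbit", "bitfinex", "cex", "binance", "poloniex"] : List String)) "cex").getD 0 : Nat) : Int) = 4 := by decide
  have e6 : (((PySem.List.index? ((["coinone", "korbit", "upbit", "bitfinex", "cex", "binance", "poloniex"] : List String)) "binance").getD 0 : Nat) : Int) = 5 := by decide
  have e7 : (((PySem.List.index? ((["coinone", "korbit", "upbit", "bitfinex", "cex", "binance", "poloniex"] : List String)) "poloniex").getD 0 : Nat) : Int) = 6 := by decide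
  have q1 : (((PySem.List.index? ((["btc", "eth", "bch", "xrp", "bnb", "usd", "usdt", "krw"] : List String)) "btc").getD 0 : Nat) : Int) = 0 := by decide
  have q2 : (((PySem.List.index? ((["btc", "eth", "bch", "xrp", "bnb", "usd", "usdt", "krw"] : List String)) "eth").getD 0 : Nat) : Int) = 1 := by decide
  have q3 : (((PySem.List.index? ((["btc", "eth", "bch", "xrp", "bnb", "usd", "usdt", "krw"] : List String)) "bch").getD 0 : Nat) : Int) = 2 := by decide
  have q4 : (((PySem.List.index? ((["btc", "eth", "bch", "xrp", "bnb", "usd", "usdt", "krw"] : List String)) "xrp").getD 0 : Nat) : Int) = 3 := by decide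
  have q5 : (((PySem.List.index? ((["btc", "eth", "bch", "xrp", "bnb", "usd", "usdt", "krw"] : List String)) "bnb").getD 0 : Nat) : Int) = 4 := by decide
  have q6 : (((PySem.List.index? ((["btc", "eth", "bch", "xrp", "bnb", "usd", "usdt", "krw"] : List String)) "usd").getD 0 : Nat) : Int) = 5 := by decide
  have q7 : (((PySem.List.index? ((["btc", "eth", "bch", "xrp", "bnb", "usd", "usdt", "krw"] : List String)) "usdt").getD 0 : Nat) : Int) = 6 := by decide
  have q8 : (((PySem.List.index? ((["btc", "eth", "bch", "xrp", "bnb", "usd", "usdt", "krw"] : List String)) "krw").getD 0 : Nat) : Int) = 7 := by decide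
  have f0 : pvFmt 0 = "!000000000000" := by decide
  have f1 : pvFmt 1 = "!000000000001" := by decide
  have f2 : pvFmt 2 = "!000000000002" := by decide
  have f3 : pvFmt 3 = "!000000000003" := by decide
  have f4 : pvFmt 4 = "!000000000004" := by decide
  have f5 : pvFmt 5 = "!000000000005" := by decide
  have f6 : pvFmt 6 = "!000000000006" := by decide
  have f7 : pvFmt 7 = "!000000000007" := by decide
  rw [pvTableLit]
  simp only [to_comparable_repr]
  conv_lhs => rw [EXCHANGE_ORDER, EQUITY_ORDER]
  simp only [List.foldl_cons, List.foldl_nil,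
    e1, e2, e3, e4, e5, e6, e7, q1, q2, q3, q4, q5, q6, q7, q8,
    f0, f1, f2, f3, f4, f5, f6, f7]

theorem pvFoldlReplBridge : ∀ (tab : List (String × String)) (s : String),
    (tab.foldl (fun acc p => PySem.Str.replace acc p.1 p.2) s).toList
      = (tab.map (fun p => (p.1.toList, p.2.toList))).foldl
          (fun l p => PySem.Chars.replace l p.1 p.2) s.toList := by
  intro tab
  induction tab with
  | nil => intro s; simp
  | cons p rest ih =>
    intro s
    simp only [List.foldl_cons, List.map_cons]
    rw [ih (PySem.Str.replace s p.1 p.2), PySem.Str.toList_replace]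

theorem pvAEqChars (v : String) :
    (to_comparable_repr v).toList
      = pvTABC.foldl (fun s p => PySem.Chars.replace s p.1 p.2) v.toList := by
  rw [pvAFoldl, pvFoldlReplBridge]
  rfl

def pvPF (p : Bool × String) : Bool × List Char := (p.1, p.2.toList)

theorem pvSplitRawBridge (n c t : String) (hn : n ≠ "") :
    (pvSplitRaw n c t).map pvPF = pvSplitC n.toList c.toList t.toList := by
  have hnl : n.toList ≠ [] := fun h => hn (String.toList_eq_nil_iff.mp h)
  unfold pvSplitRaw pvSplitC
  rw [PySem.Str.split?]
  rw [PySem.Chars.split?]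
  rw [show n.toList.isEmpty = false from by
    rw [List.isEmpty_eq_false_iff]; exact hnl]
  simp only [Bool.false_eq_true, if_false, Option.map_some, Option.getD_some]
  rcases hsplit : PySem.Chars.splitOn t.toList n.toList with _ | ⟨p0, ps⟩
  · exact absurd hsplit (pvSplitNeNil t.toList n.toList hnl)
  · simp [pvPF, List.map_flatMap, List.flatMap_map, String.toList_ofList]

theorem pvInnerBridge (n c : String) (hn : n ≠ "") :
    ∀ (ps acc : List (Bool × String)),
      ((ps.foldl (fun a p => if p.1 then a ++ [(true, p.2)] else a ++ pvSplitRaw n c p.2) acc).map pvPF)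
        = (ps.map pvPF).foldl
            (fun a p => if p.1 then a ++ [(true, p.2)] else a ++ pvSplitC n.toList c.toList p.2)
            (acc.map pvPF) := by
  intro ps
  induction ps with
  | nil => intro acc; simp
  | cons p rest ih =>
    intro acc
    simp only [List.foldl_cons, List.map_cons]
    rw [ih]
    congr 1
    by_cases hb : p.1
    · simp [hb, pvPF]
    · simp only [pvPF, Bool.false_eq_true, if_false, hb]
      rw [List.map_append, pvSplitRawBridge n c p.2 hn]

theorem pvOuterBridge : ∀ (tab : List (String × String)), (∀ p ∈ tab, p.1 ≠ "") →
    ∀ ps : List (Bool × String),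
      ((tab.foldl (fun pieces nc => pieces.foldl
          (fun a p => if p.1 then a ++ [(true, p.2)] else a ++ pvSplitRaw nc.1 nc.2 p.2) []) ps).map pvPF)
        = (tab.map (fun p => (p.1.toList, p.2.toList))).foldl
            (fun ps p => pvStepC p.1 p.2 ps) (ps.map pvPF) := by
  intro tab
  induction tab with
  | nil => intro _ ps; simp
  | cons nc rest ih =>
    intro h ps
    simp only [List.foldl_cons, List.map_cons]
    rw [ih (fun p hp => h p (List.mem_cons_of_mem _ hp))]
    congr 1
    rw [pvInnerBridge nc.1 nc.2 (h nc List.mem_cons_self) ps []]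
    rfl

theorem pvJoinNilSep : ∀ parts : List (List Char), PySem.Chars.join [] parts = parts.flatten := by
  intro parts
  induction parts with
  | nil => simp [PySem.Chars.join_nil]
  | cons p rest ih =>
    cases rest with
    | nil => simp [PySem.Chars.join_singleton]
    | cons q qs =>
      rw [PySem.Chars.join_cons_cons, ih]
      simp

theorem pvBEqChars (v : String) :
    (to_comparable_repr_alt v).toList
      = pvRender (pvTABC.foldl (fun ps p => pvStepC p.1 p.2 ps) [(false, v.toList)]) := by
  have hne : ∀ p ∈ pvTable, p.1 ≠ "" := by
    intro p hp
    have h := List.all_eq_true.mp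
      (show pvTable.all (fun p => !(p.1 == "")) = true from by decide) p hp
    simpa using h
  simp only [to_comparable_repr_alt]
  rw [PySem.Str.toList_join]
  rw [show ("" : String).toList = [] from rfl, pvJoinNilSep]
  have hout := pvOuterBridge pvTable hne [(false, v)]
  rw [show ([(false, v)].map pvPF) = [(false, v.toList)] from rfl] at hout
  rw [show pvTABC = pvTable.map (fun p => (p.1.toList, p.2.toList)) from rfl, ← hout]
  simp only [pvRender, List.map_map]
  rw [show (Prod.snd ∘ pvPF : (Bool × String) → List Char)
    = String.toList ∘ Prod.snd from funext fun p => rfl]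

-- ===== VERDICT (by name: the statement is the Claim_ definition above) =====
theorem to_comparable_repr_spec : Claim_equal_to_comparable_repr := by
  intro value _
  unfold Spec_to_comparable_repr
  have hA := pvAEqChars value
  have hB := pvBEqChars value
  have hall : pvTABC.all
      (fun p => (!p.1.isEmpty) && p.1.all pvLetter && (!p.2.isEmpty)
        && p.2.all (fun ch => !pvLetter ch)) = true := by decide
  have htab : ∀ p ∈ pvTABC, pvNameOK p.1 ∧ pvCodeOK p.2 := by
    intro p hp
    have h := List.all_eq_true.mp hall p hp
    simp only [Bool.and_eq_true, Bool.not_eq_true', List.isEmpty_eq_false_iff] at h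
    exact ⟨⟨h.1.1.1, h.1.1.2⟩, ⟨h.1.2, h.2⟩⟩
  have hchain := pvChainEq pvTABC htab [(false, value.toList)]
    (by intro p hp h; rw [List.mem_singleton] at hp; subst hp; simp at h)
    (by simp [pvSep])
  have hrender : pvRender [(false, value.toList)] = value.toList := by
    simp [pvRender]
  rw [hrender] at hchain
  have : (to_comparable_repr value).toList = (to_comparable_repr_alt value).toList := by
    rw [hA, hB, hchain]
  calc to_comparable_repr value = String.ofList (to_comparable_repr value).toList := by
        rw [String.ofList_toList]
    _ = String.ofList (to_comparable_repr_alt value).toList := by rw [this]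
    _ = to_comparable_repr_alt value := by rw [String.ofList_toList]
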